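-- pv_equiv track=rewrite | github.com/silveroakjuniors/oakit.ai | apps/ai-service/query_pipeline.py | _match_subject
-- ===== SOURCE A (Python) =====
-- SUBJECT_ALIASES = {
--     "math": ["math","maths","mathematics","numbers","counting"],
--     "english": ["english","reading","phonics","sight words","vowel","letters"],
--     "english speaking": ["english speaking","speaking","oral","speech"],
--     "writing": ["writing","handwriting","copy writing","pencil"],
--     "gk": ["gk","general knowledge","general","activities at school"],
--     "art": ["art","drawing","colouring","craft"],
--     "circle time": ["circle time","morning meet","morning meeting","additional activities"],
--     "regional language": ["regional","regional language","hindi","language"],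
-- }
--
-- def _match_subject(text_lower: str, subject: str) -> bool:
--     subj_lower = subject.lower()
--     if subj_lower in text_lower:
--         return True
--     for canonical, aliases in SUBJECT_ALIASES.items():
--         if canonical in subj_lower or subj_lower in canonical:
--             if any(alias in text_lower for alias in aliases):
--                 return True
--     return False
-- ===== SOURCE B (Python) =====
-- SUBJECT_ALIASES = {
--     "math": ["math","maths","mathematics","numbers","counting"],
--     "english": ["english","reading","phonics","sight words","vowel","letters"],
--     "english speaking": ["english speaking","speaking","oral","speech"],
--     "writing": ["writing","handwriting","copy writing","pencil"],
--     "gk": ["gk","general knowledge","general","activities at school"],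
--     "art": ["art","drawing","colouring","craft"],
--     "circle time": ["circle time","morning meet","morning meeting","additional activities"],
--     "regional language": ["regional","regional language","hindi","language"],
-- }
--
-- # inverted index: flat (alias, canonical) pairs, built once
-- _ALIAS_INDEX = [(alias, canonical)
--                 for canonical, aliases in SUBJECT_ALIASES.items()
--                 for alias in aliases]
--
-- def _match_subject(text_lower: str, subject: str) -> bool:
--     subj_lower = subject.lower()
--     if subj_lower in text_lower:
--         return True
--     # scan the TEXT side first: which canonical subjects have an alias in the text?
--     hit_keys = {canonical for alias, canonical in _ALIAS_INDEX if alias in text_lower}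
--     # then match the subject against the hit keys
--     return any(k in subj_lower or subj_lower in k for k in hit_keys)
-- ===== Notes on version B (the rewrite author's own statement) =====
-- stated objective: alternative
-- what changed: Replaces A's per-canonical nested loop (filter keys by the subject, then scan aliases against the text) with an inverted alias-to-canonical index scanned text-side first: collect the set of canonical keys whose alias occurs in the text, then match the subject against that hit set.
import Mathlib
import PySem

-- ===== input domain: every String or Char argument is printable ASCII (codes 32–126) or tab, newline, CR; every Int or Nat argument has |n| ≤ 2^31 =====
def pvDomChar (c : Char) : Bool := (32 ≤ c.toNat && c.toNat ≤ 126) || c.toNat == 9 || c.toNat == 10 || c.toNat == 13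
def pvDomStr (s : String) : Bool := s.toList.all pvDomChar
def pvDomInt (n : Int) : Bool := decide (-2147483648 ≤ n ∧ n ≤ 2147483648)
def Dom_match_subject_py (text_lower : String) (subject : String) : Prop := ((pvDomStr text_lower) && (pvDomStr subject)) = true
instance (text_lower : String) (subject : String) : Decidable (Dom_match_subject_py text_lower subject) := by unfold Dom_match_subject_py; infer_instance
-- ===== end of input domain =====

-- B inverts the data structure: a flat alias->canonical index is scanned text-side first into a set
-- of hit canonical keys, and the subject is then matched against that set (alternative decomposition, same cost).

-- the module constant SUBJECT_ALIASES, in dict insertion order (shared context, not part of either algorithm)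
def subjectAliases : List (String × List String) :=
  [ ("math", ["math","maths","mathematics","numbers","counting"]),
    ("english", ["english","reading","phonics","sight words","vowel","letters"]),
    ("english speaking", ["english speaking","speaking","oral","speech"]),
    ("writing", ["writing","handwriting","copy writing","pencil"]),
    ("gk", ["gk","general knowledge","general","activities at school"]),
    ("art", ["art","drawing","colouring","craft"]),
    ("circle time", ["circle time","morning meet","morning meeting","additional activities"]),
    ("regional language", ["regional","regional language","hindi","language"]) ]

-- ===== PORT A =====
-- A's for-loop with its early 'return True', as structural recursion over the items
def matchLoopA (text_lower : String) (subj_lower : String) : List (String × List String) → Bool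
  | [] => false
  | (canonical, aliases) :: rest =>
    if PySem.Str.isIn canonical subj_lower || PySem.Str.isIn subj_lower canonical then
      if aliases.any (fun c => PySem.Str.isIn c text_lower) then true
      else matchLoopA text_lower subj_lower rest
    else matchLoopA text_lower subj_lower rest

def match_subject_py (text_lower : String) (subject : String) : Bool :=
  let subj_lower := PySem.Str.lower subject
  if PySem.Str.isIn subj_lower text_lower then true
  else matchLoopA text_lower subj_lower subjectAliases

-- ===== PORT B =====
-- _ALIAS_INDEX: flat (alias, canonical) pairs (the nested comprehension over SUBJECT_ALIASES.items())
def aliasIndex : List (String × String) :=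
  subjectAliases.flatMap (fun p => p.2.map (fun a => (a, p.1)))

def match_subject_py_alt (text_lower : String) (subject : String) : Bool :=
  let subj_lower := PySem.Str.lower subject
  if PySem.Str.isIn subj_lower text_lower then true
  else
    -- hit_keys = {canonical for alias, canonical in _ALIAS_INDEX if alias in text_lower}
    let hit_keys : PySem.Set String :=
      PySem.Set.ofList ((aliasIndex.filter (fun q => PySem.Str.isIn q.1 text_lower)).map Prod.snd)
    -- any(...) over a set: the result is a Bool, independent of iteration order
    hit_keys.any (fun k => PySem.Str.isIn k subj_lower || PySem.Str.isIn subj_lower k)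

-- ===== PRECONDITION & SPEC =====
def Spec_match_subject_py (text_lower : String) (subject : String) (out : Bool) : Prop := out = match_subject_py_alt text_lower subject
instance (text_lower : String) (subject : String) (out : Bool) : Decidable (Spec_match_subject_py text_lower subject out) := by unfold Spec_match_subject_py; infer_instance

-- ===== CLAIM (what is proved, stated in full; the proofs are below) =====
def Claim_equal_match_subject_py : Prop := ∀ (text_lower : String) (subject : String), Dom_match_subject_py text_lower subject → Spec_match_subject_py text_lower subject (match_subject_py text_lower subject)

-- ===== LEMMAS AND PROOFS =====

-- A's early-return loop is the existence of an item whose key matches the subject and one of whose aliases is in the text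
theorem matchLoopA_eq_true_iff (text_lower subj_lower : String) (l : List (String × List String)) :
    matchLoopA text_lower subj_lower l = true ↔
      ∃ p ∈ l, (PySem.Str.isIn p.1 subj_lower || PySem.Str.isIn subj_lower p.1) = true ∧
        ∃ a ∈ p.2, PySem.Str.isIn a text_lower = true := by
  induction l with
  | nil => simp [matchLoopA]
  | cons p rest ih =>
    obtain ⟨c, as⟩ := p
    simp only [matchLoopA]
    split_ifs with h1 h2
    · simp only [List.any_eq_true] at h2
      simp only [List.mem_cons, true_iff]
      exact ⟨(c, as), Or.inl rfl, h1, h2⟩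
    · simp only [List.any_eq_true] at h2
      rw [ih]; constructor
      · rintro ⟨q, hq, hrest⟩; exact ⟨q, List.mem_cons_of_mem _ hq, hrest⟩
      · rintro ⟨q, hq, hrel, ha⟩
        rcases List.mem_cons.mp hq with rfl | hq
        · exact absurd ha h2
        · exact ⟨q, hq, hrel, ha⟩
    · rw [ih]; constructor
      · rintro ⟨q, hq, hrest⟩; exact ⟨q, List.mem_cons_of_mem _ hq, hrest⟩
      · rintro ⟨q, hq, hrel, ha⟩
        rcases List.mem_cons.mp hq with rfl | hq
        · simp at h1; exact absurd hrel (by simp [h1])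
        · exact ⟨q, hq, hrel, ha⟩

-- B's set-scan equals A's loop over the same table
theorem alt_scan_eq_loop (text_lower subj_lower : String) :
    (PySem.Set.ofList ((aliasIndex.filter (fun q => PySem.Str.isIn q.1 text_lower)).map Prod.snd)).any
        (fun k => PySem.Str.isIn k subj_lower || PySem.Str.isIn subj_lower k)
      = matchLoopA text_lower subj_lower subjectAliases := by
  rw [Bool.eq_iff_iff, List.any_eq_true, matchLoopA_eq_true_iff]
  constructor
  · rintro ⟨k, hk, hrel⟩
    rw [PySem.Set.mem_ofList] at hk
    simp only [List.mem_map, List.mem_filter] at hk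
    obtain ⟨q, ⟨hqmem, htext⟩, rfl⟩ := hk
    simp only [aliasIndex, List.mem_flatMap, List.mem_map] at hqmem
    obtain ⟨p, hp, a, ha, rfl⟩ := hqmem
    exact ⟨p, hp, hrel, a, ha, htext⟩
  · rintro ⟨p, hp, hrel, a, ha, htext⟩
    refine ⟨p.1, ?_, hrel⟩
    rw [PySem.Set.mem_ofList]
    simp only [List.mem_map, List.mem_filter]
    refine ⟨(a, p.1), ⟨?_, htext⟩, rfl⟩
    simp only [aliasIndex, List.mem_flatMap, List.mem_map]
    exact ⟨p, hp, a, ha, rfl⟩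

-- ===== VERDICT (by name: the statement is the Claim_ definition above) =====
theorem match_subject_py_spec : Claim_equal_match_subject_py := by
  intro text_lower subject _
  unfold Spec_match_subject_py match_subject_py match_subject_py_alt
  simp only [alt_scan_eq_loop]
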